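-- pv_equiv track=rewrite | github.com/Min-su-Jeong/Algorithm_Study | 프로그래머스/1/140108. 문자열 나누기/문자열 나누기.py | solution
-- ===== SOURCE A (Python) =====
-- from collections import deque
--
-- def solution(s):
--     ret = 0
--
--     q = deque(s)
--     while q:
--         s1, s2 = 1, 0
--         x = q.popleft()
--
--         while q:
--             y = q.popleft()
--
--             if x == y:
--                 s1 += 1
--             else:
--                 s2 += 1
--
--             if s1 == s2:
--                 ret += 1
--                 break
--
--         if s1 != s2:
--             ret += 1
--
--     return ret
-- ===== SOURCE B (Python) =====
-- def solution(s):
--     ret = 0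
--     same = diff = 0
--     x = ''
--     for c in s:
--         if same == diff:
--             ret += 1
--             x = c
--             same, diff = 1, 0
--         elif c == x:
--             same += 1
--         else:
--             diff += 1
--     return ret
-- ===== Notes on version B (the rewrite author's own statement) =====
-- stated objective: idiomatic
-- what changed: Replaces the deque with nested popleft while-loops by a single for-pass over the string maintaining same/diff counters and the current group's anchor character, counting a group at each boundary (same == diff).
import Mathlib
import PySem

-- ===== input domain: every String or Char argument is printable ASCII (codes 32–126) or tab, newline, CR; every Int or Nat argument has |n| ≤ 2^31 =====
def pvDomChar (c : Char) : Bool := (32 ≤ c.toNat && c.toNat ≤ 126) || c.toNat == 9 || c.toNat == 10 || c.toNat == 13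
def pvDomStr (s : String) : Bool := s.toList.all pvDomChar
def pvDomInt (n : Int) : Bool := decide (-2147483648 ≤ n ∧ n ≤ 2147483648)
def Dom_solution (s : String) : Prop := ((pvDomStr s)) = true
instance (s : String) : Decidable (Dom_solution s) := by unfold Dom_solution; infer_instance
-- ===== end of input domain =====

-- B replaces A's deque with nested popleft loops by a single for-pass over the string
-- keeping two counters and the current anchor char (idiomatic; same linear cost).

-- ===== PORT A =====
-- inner while loop of A: consumes chars from q updating s1/s2 until s1 == s2 (break,
-- ret += 1) or q is exhausted (then the trailing `if s1 != s2: ret += 1`);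
-- returns (increment to ret, remaining deque).
def solInner (x : Char) : List Char → Int → Int → Int × List Char
  | [], s1, s2 => (if s1 ≠ s2 then 1 else 0, [])
  | y :: q, s1, s2 =>
    let s1' : Int := if x = y then s1 + 1 else s1
    let s2' : Int := if x = y then s2 else s2 + 1
    if s1' = s2' then (1, q) else solInner x q s1' s2'

theorem solInner_len (x : Char) (q : List Char) (s1 s2 : Int) :
    (solInner x q s1 s2).2.length ≤ q.length := by
  induction q generalizing s1 s2 with
  | nil => simp [solInner]
  | cons y q ih =>
    simp only [solInner]
    split_ifs with hxy hb hb
    · simp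
    · exact le_trans (ih _ _) (Nat.le_succ _)
    · simp
    · exact le_trans (ih _ _) (Nat.le_succ _)

-- outer while loop of A: pop x, run the inner loop, accumulate ret.
def solOuter : List Char → Int → Int
  | [], ret => ret
  | x :: q, ret =>
    let r := solInner x q 1 0
    solOuter r.2 (ret + r.1)
  termination_by q _ => q.length
  decreasing_by exact Nat.lt_succ_of_le (solInner_len x q 1 0)

def solution (s : String) : Int := solOuter s.toList 0

-- ===== PORT B =====
-- one step of B's `for c in s` loop over state (ret, same, diff, x).
def altStep (st : Int × Int × Int × Char) (c : Char) : Int × Int × Int × Char :=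
  let (ret, same, diff, x) := st
  if same = diff then (ret + 1, 1, 0, c)
  else if c = x then (ret, same + 1, diff, x)
  else (ret, same, diff + 1, x)

-- Python's initial x = '' is never compared (the first iteration has same == diff
-- and overwrites x); ' ' stands in for it.
def solution_alt (s : String) : Int := (s.toList.foldl altStep (0, 0, 0, ' ')).1

-- ===== PRECONDITION & SPEC =====
def Spec_solution (s : String) (out : Int) : Prop := out = solution_alt s
instance (s : String) (out : Int) : Decidable (Spec_solution s out) := by unfold Spec_solution; infer_instance

-- ===== CLAIM (what is proved, stated in full; the proofs are below) =====
def Claim_equal_solution : Prop := ∀ (s : String), Dom_solution s → Spec_solution s (solution s)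

-- ===== LEMMAS AND PROOFS =====

-- one step of B's fold, written out (definitional).
theorem altStep_eq (r s1 s2 : Int) (x c : Char) :
    altStep (r, s1, s2, x) c =
      if s1 = s2 then (r + 1, 1, 0, c)
      else if c = x then (r, s1 + 1, s2, x) else (r, s1, s2 + 1, x) := rfl

-- the ret component of B's fold is an accumulator: shifting the start shifts the result.
theorem altStep_shift (q : List Char) (r s1 s2 : Int) (x : Char) :
    (q.foldl altStep (r, s1, s2, x)).1 = r + (q.foldl altStep (0, s1, s2, x)).1 := by
  induction q generalizing r s1 s2 x with
  | nil => simp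
  | cons c q ih =>
    rw [List.foldl_cons, List.foldl_cons, altStep_eq, altStep_eq]
    by_cases h1 : s1 = s2
    · rw [if_pos h1, if_pos h1, ih (r + 1), ih (0 + 1)]; ring
    · rw [if_neg h1, if_neg h1]
      by_cases h2 : c = x
      · rw [if_pos h2, if_pos h2, ih r]
      · rw [if_neg h2, if_neg h2, ih r]

-- from any boundary state (same = diff) the fold counts the same as from the fresh start.
theorem altStep_reset (q : List Char) (r s : Int) (x : Char) :
    (q.foldl altStep (r, s, s, x)).1 = r + (q.foldl altStep ((0 : Int), 0, 0, ' ')).1 := by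
  cases q with
  | nil => simp
  | cons c q =>
    rw [List.foldl_cons, List.foldl_cons, altStep_eq, altStep_eq,
      if_pos (rfl : s = s), if_pos (rfl : (0 : Int) = 0),
      altStep_shift q (r + 1), altStep_shift q (0 + 1)]
    ring

-- A's inner loop always yields increment 1 when started with s1 ≠ s2.
theorem solInner_fst (x : Char) (q : List Char) (s1 s2 : Int) (h : s1 ≠ s2) :
    (solInner x q s1 s2).1 = 1 := by
  induction q generalizing s1 s2 with
  | nil => simp [solInner, h]
  | cons y q ih =>
    simp only [solInner]
    split_ifs with hxy hb hb
    · rfl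
    · exact ih _ _ hb
    · rfl
    · exact ih _ _ hb

-- mid-group correspondence: B's fold from a non-boundary state equals the start ret
-- plus the fresh-start count of the deque left over by A's inner loop.
theorem fold_inner (q : List Char) (x : Char) (s1 s2 r : Int) (h : s1 ≠ s2) :
    (q.foldl altStep (r, s1, s2, x)).1
      = r + ((solInner x q s1 s2).2.foldl altStep ((0 : Int), 0, 0, ' ')).1 := by
  induction q generalizing s1 s2 r with
  | nil => simp [solInner, h]
  | cons y q ih =>
    rw [List.foldl_cons, altStep_eq, if_neg h]
    by_cases hxy : x = y
    · subst hxy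
      rw [if_pos rfl]
      simp only [solInner, if_true]
      by_cases hb : s1 + 1 = s2
      · rw [if_pos hb]
        have := altStep_reset q r s2 x
        rw [hb]; exact this
      · rw [if_neg hb]; exact ih _ _ _ hb
    · have hyx : ¬ y = x := fun e => hxy e.symm
      rw [if_neg hyx]
      simp only [solInner, if_neg hxy]
      by_cases hb : s1 = s2 + 1
      · rw [if_pos hb]
        have := altStep_reset q r s1 x
        rw [hb] at this ⊢; exact this
      · rw [if_neg hb]; exact ih _ _ _ hb

-- main invariant: A's outer loop equals its accumulator plus B's fresh-start count,
-- by strong induction on the deque length.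
theorem outer_eq_fold : ∀ (n : Nat) (q : List Char), q.length ≤ n → ∀ (ret : Int),
    solOuter q ret = ret + (q.foldl altStep ((0 : Int), 0, 0, ' ')).1 := by
  intro n
  induction n with
  | zero =>
    intro q hq ret
    have hq0 : q = [] := List.eq_nil_of_length_eq_zero (Nat.le_zero.mp hq)
    subst hq0; simp [solOuter]
  | succ n ih =>
    intro q hq ret
    cases q with
    | nil => simp [solOuter]
    | cons x q =>
      have hlen : (solInner x q 1 0).2.length ≤ n :=
        le_trans (solInner_len x q 1 0) (Nat.lt_succ_iff.mp hq)
      rw [solOuter, ih _ hlen]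
      have h1 : (solInner x q 1 0).1 = 1 := solInner_fst x q 1 0 (by norm_num)
      have h2 : ((x :: q).foldl altStep ((0 : Int), 0, 0, ' ')).1
          = 1 + ((solInner x q 1 0).2.foldl altStep ((0 : Int), 0, 0, ' ')).1 := by
        rw [List.foldl_cons, altStep_eq, if_pos (rfl : (0 : Int) = 0)]
        rw [fold_inner q x 1 0 (0 + 1) (by norm_num)]
        ring
      rw [h2, h1]; ring

-- ===== VERDICT (by name: the statement is the Claim_ definition above) =====
theorem solution_spec : Claim_equal_solution := by
  intro s _
  unfold Spec_solution solution solution_alt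
  exact (outer_eq_fold s.toList.length s.toList le_rfl 0).trans (by ring)
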